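-- pv_equiv track=rewrite | github.com/soumyajitcodes/Python-HackerRank-Solutions | Sets/no_idea.py | happiness
-- ===== SOURCE A (Python) =====
-- def happiness(num_arr, A, B):
--     happiness = 0
--     for i in num_arr:
--         if i in A:
--             happiness += 1
--         elif i in B:
--             happiness -= 1
--         else:
--             happiness += 0
--     return happiness
-- ===== SOURCE B (Python) =====
-- def happiness(num_arr, A, B):
--     freq = {}
--     for x in num_arr:
--         freq[x] = freq.get(x, 0) + 1
--     sa = set(A)
--     total = sum(freq.get(x, 0) for x in sa)
--     for x in set(B):
--         if x not in sa:
--             total -= freq.get(x, 0)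
--     return total
-- ===== Notes on version B (the rewrite author's own statement) =====
-- stated objective: alternative
-- what changed: Instead of probing membership of each element of num_arr in the lists A and B, B builds a frequency table of num_arr once and sums multiplicities over set(A) and over set(B)\set(A); it trades per-element list scans for a hash table and an inverted traversal over the query sets.
import Mathlib
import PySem

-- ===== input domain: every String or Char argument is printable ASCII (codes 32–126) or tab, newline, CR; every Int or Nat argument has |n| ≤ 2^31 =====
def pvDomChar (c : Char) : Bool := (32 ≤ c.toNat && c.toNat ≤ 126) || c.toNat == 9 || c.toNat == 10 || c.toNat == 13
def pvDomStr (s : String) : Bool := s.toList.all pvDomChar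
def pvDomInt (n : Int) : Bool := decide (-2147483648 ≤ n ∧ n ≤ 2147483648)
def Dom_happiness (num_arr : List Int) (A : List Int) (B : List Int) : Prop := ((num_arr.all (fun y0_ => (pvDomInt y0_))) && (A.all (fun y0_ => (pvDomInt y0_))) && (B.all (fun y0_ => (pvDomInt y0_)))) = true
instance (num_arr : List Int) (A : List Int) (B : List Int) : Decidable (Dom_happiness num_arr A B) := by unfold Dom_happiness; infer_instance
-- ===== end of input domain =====

-- B inverts A's traversal: instead of testing each element of num_arr for membership
-- in A and B, it builds a frequency table of num_arr and sums multiplicities over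
-- set(A) and set(B)\set(A) (an alternative algorithm; same value everywhere).


-- ===== PORT A =====
def happiness (num_arr : List Int) (A : List Int) (B : List Int) : Int :=
  num_arr.foldl (fun happiness i =>
    if i ∈ A then happiness + 1
    else if i ∈ B then happiness - 1
    else happiness + 0) 0

-- ===== PORT B =====
def happiness_alt (num_arr : List Int) (A : List Int) (B : List Int) : Int :=
  let freq : PySem.Dict Int Int :=
    num_arr.foldl (fun d x => d.insert x (d.getD x 0 + 1)) PySem.Dict.empty
  let sa : PySem.Set Int := PySem.Set.ofList A
  let total : Int := (sa.map (fun x => freq.getD x 0)).sum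
  (PySem.Set.ofList B).foldl
    (fun t x => if PySem.Set.contains sa x then t else t - freq.getD x 0) total

-- ===== PRECONDITION & SPEC =====
def Spec_happiness (num_arr : List Int) (A : List Int) (B : List Int) (out : Int) : Prop := out = happiness_alt num_arr A B
instance (num_arr : List Int) (A : List Int) (B : List Int) (out : Int) : Decidable (Spec_happiness num_arr A B out) := by unfold Spec_happiness; infer_instance

-- ===== CLAIM (what is proved, stated in full; the proofs are below) =====
def Claim_equal_happiness : Prop := ∀ (num_arr : List Int) (A : List Int) (B : List Int), Dom_happiness num_arr A B → Spec_happiness num_arr A B (happiness num_arr A B)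

-- ===== LEMMAS AND PROOFS =====

-- A's loop accumulates the per-element score.
lemma foldlA (A B : List Int) : ∀ (l : List Int) (c : Int),
    l.foldl (fun h i => if i ∈ A then h + 1 else if i ∈ B then h - 1 else h + 0) c
      = c + (l.map (fun i => if i ∈ A then (1:Int) else if i ∈ B then -1 else 0)).sum := by
  intro l
  induction l with
  | nil => simp
  | cons a l ih =>
    intro c
    simp only [List.foldl_cons, List.map_cons, List.sum_cons, ih]
    split_ifs <;> ring

-- B's subtracting loop as a sum.
lemma foldlB (p : Int → Bool) (g : Int → Int) : ∀ (s : List Int) (c : Int),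
    s.foldl (fun t x => if p x then t else t - g x) c
      = c + (s.map (fun x => if p x then (0:Int) else -g x)).sum := by
  intro s
  induction s with
  | nil => simp
  | cons a s ih =>
    intro c
    simp only [List.foldl_cons, List.map_cons, List.sum_cons, ih]
    split_ifs <;> ring

lemma sum_map_add (f g : Int → Int) : ∀ (s : List Int),
    (s.map (fun x => f x + g x)).sum = (s.map f).sum + (s.map g).sum := by
  intro s
  induction s with
  | nil => simp
  | cons a s ih => simp only [List.map_cons, List.sum_cons, ih]; ring

-- over a duplicate-free list, an indicator supported at i sums to its value at i
lemma sum_ind (g : Int → Int) (i : Int) : ∀ (s : List Int), s.Nodup →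
    (s.map (fun x => if x = i then g x else 0)).sum = if i ∈ s then g i else 0 := by
  intro s
  induction s with
  | nil => simp
  | cons a s ih =>
    intro hnd
    have hna : a ∉ s := (List.nodup_cons.mp hnd).1
    simp only [List.map_cons, List.sum_cons, ih hnd.of_cons, List.mem_cons]
    by_cases hai : a = i
    · subst hai
      simp [hna]
    · have : ¬ (i = a) := fun h => hai h.symm
      simp [hai, this]

lemma count_cons_int (i : Int) (l : List Int) (x : Int) :
    (((i :: l).count x : Int)) = (l.count x : Int) + (if x = i then 1 else 0) := by
  rw [List.count_cons]
  by_cases h : x = i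
  · subst h
    simp
  · have h2 : ¬ i = x := fun e => h e.symm
    simp [h, h2]

lemma A_side (i : Int) (l : List Int) (s : List Int) (hs : s.Nodup) :
    (s.map (fun x => (((i :: l).count x : Int)))).sum
      = (s.map (fun x => ((l.count x : Int)))).sum + (if i ∈ s then 1 else 0) := by
  have h : (s.map (fun x => (((i :: l).count x : Int)))).sum
      = (s.map (fun x => (l.count x : Int) + (if x = i then (1:Int) else 0))).sum := by
    congr 1
    exact List.map_congr_left (fun x _ => count_cons_int i l x)
  rw [h, sum_map_add, sum_ind (fun _ => (1:Int)) i s hs]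

lemma B_side (A : List Int) (i : Int) (l : List Int) (s : List Int) (hs : s.Nodup) :
    (s.map (fun x => if x ∈ A then (0:Int) else -((i :: l).count x : Int))).sum
      = (s.map (fun x => if x ∈ A then (0:Int) else -(l.count x : Int))).sum
        + (if i ∈ s then (if i ∈ A then 0 else -1) else 0) := by
  have h : (s.map (fun x => if x ∈ A then (0:Int) else -((i :: l).count x : Int))).sum
      = (s.map (fun x => (if x ∈ A then (0:Int) else -(l.count x : Int))
          + (if x = i then (if x ∈ A then (0:Int) else -1) else 0))).sum := by
    congr 1
    apply List.map_congr_left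
    intro x _
    rw [count_cons_int i l x]
    by_cases hxi : x = i
    · subst hxi
      by_cases hA : x ∈ A <;> simp [hA]
      ring
    · by_cases hA : x ∈ A <;> simp [hA, hxi]
  rw [h, sum_map_add, sum_ind (fun x => if x ∈ A then (0:Int) else -1) i s hs]

-- Core: the per-element scores sum to the set-indexed count sums.
lemma core (A B : List Int) (S T : List Int) (hS : S.Nodup) (hT : T.Nodup)
    (hSA : ∀ x : Int, x ∈ S ↔ x ∈ A) (hTB : ∀ x : Int, x ∈ T ↔ x ∈ B) :
    ∀ (l : List Int),
    (l.map (fun i => if i ∈ A then (1:Int) else if i ∈ B then -1 else 0)).sum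
      = (S.map (fun x => ((l.count x : Int)))).sum
        + (T.map (fun x => if x ∈ A then (0:Int) else -(l.count x : Int))).sum := by
  intro l
  induction l with
  | nil => simp
  | cons i l ih =>
    simp only [List.map_cons, List.sum_cons, ih, A_side i l S hS, B_side A i l T hT]
    have h1 : (i ∈ S) ↔ (i ∈ A) := hSA i
    have h2 : (i ∈ T) ↔ (i ∈ B) := hTB i
    simp only [h1, h2]
    by_cases hA : i ∈ A <;> by_cases hB : i ∈ B <;> simp [hA, hB] <;> linarith

lemma getD_freq (num_arr : List Int) (x : Int) :
    (num_arr.foldl (fun d y => d.insert y (d.getD y 0 + 1)) PySem.Dict.empty).getD x 0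
      = (num_arr.count x : Int) := by
  rw [PySem.Dict.foldl_insert_getD_add_one_eq_counter]
  exact PySem.Dict.getD_counter num_arr x

-- ===== VERDICT (by name: the statement is the Claim_ definition above) =====
theorem happiness_spec : Claim_equal_happiness := by
  intro num_arr A B _
  unfold Spec_happiness happiness happiness_alt
  simp only [getD_freq, foldlA, foldlB, zero_add]
  have hc : ∀ x : Int, PySem.Set.contains (PySem.Set.ofList A) x = decide (x ∈ A) := by
    intro x
    simp [PySem.Set.contains_eq_listContains, PySem.Set.mem_ofList]
  simp only [hc, decide_eq_true_eq]
  exact core A B (PySem.Set.ofList A) (PySem.Set.ofList B)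
        (PySem.Set.nodup_ofList A) (PySem.Set.nodup_ofList B)
        (fun x => PySem.Set.mem_ofList A x) (fun x => PySem.Set.mem_ofList B x) num_arr
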